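-- pv_equiv track=rewrite | github.com/NeurodataWithoutBorders/pynwb | src/pynwb/form/utils.py | __sort_args
-- ===== SOURCE A (Python) =====
-- import itertools as _itertools
--
-- def __sort_args(validator):
--     pos = list()
--     kw = list()
--     for arg in validator:
--         if "default" in arg:
--             kw.append(arg)
--         else:
--             pos.append(arg)
--     return list(_itertools.chain(pos, kw))
-- ===== SOURCE B (Python) =====
-- def __sort_args(validator):
--     return sorted(validator, key=lambda arg: "default" in arg)
-- ===== Notes on version B (the rewrite author's own statement) =====
-- stated objective: idiomatic
-- what changed: Replaces the two-accumulator partition loop and itertools.chain with a single stable sort on the boolean key 'default' in arg; stability keeps within-group order, so positionals come first in original order exactly as in A.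
import Mathlib
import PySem

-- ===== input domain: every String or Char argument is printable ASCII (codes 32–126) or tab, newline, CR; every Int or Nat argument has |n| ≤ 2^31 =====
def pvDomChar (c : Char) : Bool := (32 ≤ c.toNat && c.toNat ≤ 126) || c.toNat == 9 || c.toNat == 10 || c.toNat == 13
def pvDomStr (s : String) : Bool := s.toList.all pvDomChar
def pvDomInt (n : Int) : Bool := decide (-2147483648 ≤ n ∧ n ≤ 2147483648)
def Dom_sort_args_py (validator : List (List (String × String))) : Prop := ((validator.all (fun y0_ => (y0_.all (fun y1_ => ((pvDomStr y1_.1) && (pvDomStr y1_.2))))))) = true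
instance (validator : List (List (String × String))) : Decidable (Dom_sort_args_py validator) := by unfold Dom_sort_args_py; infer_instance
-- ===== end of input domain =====

-- B replaces A's two-accumulator partition loop with one stable sort keyed on the boolean
-- "default" in arg (idiomatic; same return value, not claimed faster).

-- ===== PORT A =====
-- literal port: two accumulator lists, appended in order, then chained pos ++ kw
def sort_args_py (validator : List (List (String × String))) : List (List (String × String)) :=
  let acc := validator.foldl
    (fun (acc : List (List (String × String)) × List (List (String × String))) arg =>
      if arg.any (fun p => p.1 == "default") then (acc.1, acc.2 ++ [arg])
      else (acc.1 ++ [arg], acc.2))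
    ([], [])
  acc.1 ++ acc.2

-- ===== PORT B =====
-- literal port of Source B: sorted(validator, key=lambda arg: "default" in arg)
-- Python's bool key False/True is ported as Int 0/1 (same order, same stability)
def sort_args_py_alt (validator : List (List (String × String))) : List (List (String × String)) :=
  PySem.List.sorted validator
    (fun arg => if arg.any (fun p => p.1 == "default") then (1 : Int) else 0)

-- ===== PRECONDITION & SPEC =====
def Spec_sort_args_py (validator : List (List (String × String))) (out : List (List (String × String))) : Prop := out = sort_args_py_alt validator
instance (validator : List (List (String × String))) (out : List (List (String × String))) : Decidable (Spec_sort_args_py validator out) := by unfold Spec_sort_args_py; infer_instance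

-- ===== CLAIM (what is proved, stated in full; the proofs are below) =====
def Claim_equal_sort_args_py : Prop := ∀ (validator : List (List (String × String))), Dom_sort_args_py validator → Spec_sort_args_py validator (sort_args_py validator)

-- ===== LEMMAS AND PROOFS =====

def pvHasDef (arg : List (String × String)) : Bool := arg.any (fun p => p.1 == "default")

def pvKey (arg : List (String × String)) : Int := if pvHasDef arg then 1 else 0

lemma pvBefore_iff (a b : List (String × String)) :
    decide (pvKey a < pvKey b) = (!pvHasDef a && pvHasDef b) := by
  unfold pvKey
  cases ha : pvHasDef a <;> cases hb : pvHasDef b <;> simp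

-- inserting a no-default element into pos ++ kw places it between the groups
lemma insertBy_pos (x : List (String × String)) (pos kw : List (List (String × String)))
    (hx : pvHasDef x = false)
    (hp : ∀ a ∈ pos, pvHasDef a = false) (hk : ∀ a ∈ kw, pvHasDef a = true) :
    PySem.List.insertBy (fun a b => decide (pvKey a < pvKey b)) x (pos ++ kw)
      = (pos ++ [x]) ++ kw := by
  induction pos with
  | nil =>
    cases kw with
    | nil => simp [PySem.List.insertBy]
    | cons y ys =>
      have hy : pvHasDef y = true := hk y (by simp)
      simp [PySem.List.insertBy, pvBefore_iff, hx, hy]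
  | cons p ps ih =>
    have hpp : pvHasDef p = false := hp p (by simp)
    have hcond : decide (pvKey x < pvKey p) = false := by
      rw [pvBefore_iff, hx]; simp [hpp]
    simp only [List.cons_append, PySem.List.insertBy, hcond, Bool.false_eq_true, if_false]
    rw [ih (fun a ha => hp a (by simp [ha]))]

-- inserting a defaulted element goes to the very end
lemma insertBy_kw (x : List (String × String)) (ys : List (List (String × String)))
    (hx : pvHasDef x = true) :
    PySem.List.insertBy (fun a b => decide (pvKey a < pvKey b)) x ys = ys ++ [x] := by
  apply PySem.List.insertBy_of_forall_not_before
  intro y _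
  simp [pvBefore_iff, hx]

lemma foldl_main (xs pos kw : List (List (String × String)))
    (hp : ∀ a ∈ pos, pvHasDef a = false) (hk : ∀ a ∈ kw, pvHasDef a = true) :
    xs.foldl (fun acc x => PySem.List.insertBy (fun a b => decide (pvKey a < pvKey b)) x acc)
        (pos ++ kw)
      = (xs.foldl
          (fun (acc : List (List (String × String)) × List (List (String × String))) arg =>
            if pvHasDef arg then (acc.1, acc.2 ++ [arg]) else (acc.1 ++ [arg], acc.2))
          (pos, kw)).1
        ++ (xs.foldl
          (fun (acc : List (List (String × String)) × List (List (String × String))) arg =>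
            if pvHasDef arg then (acc.1, acc.2 ++ [arg]) else (acc.1 ++ [arg], acc.2))
          (pos, kw)).2 := by
  induction xs generalizing pos kw with
  | nil => simp
  | cons x xs ih =>
    by_cases hx : pvHasDef x = true
    · rw [List.foldl_cons, insertBy_kw x (pos ++ kw) hx, List.append_assoc]
      rw [List.foldl_cons]
      simp only [hx]
      exact ih pos (kw ++ [x]) hp (by
        intro a ha
        rcases List.mem_append.mp ha with h | h
        · exact hk a h
        · simp at h; subst h; exact hx)
    · have hx' : pvHasDef x = false := by simpa using hx
      rw [List.foldl_cons, insertBy_pos x pos kw hx' hp hk]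
      rw [List.foldl_cons]
      simp only [hx', Bool.false_eq_true, if_false]
      exact ih (pos ++ [x]) kw (by
        intro a ha
        rcases List.mem_append.mp ha with h | h
        · exact hp a h
        · simp at h; subst h; exact hx') hk

-- ===== VERDICT (by name: the statement is the Claim_ definition above) =====
theorem sort_args_py_spec : Claim_equal_sort_args_py := by
  intro validator _
  unfold Spec_sort_args_py sort_args_py sort_args_py_alt
  have hkey : (fun (arg : List (String × String)) =>
      if arg.any (fun p => p.1 == "default") then (1 : Int) else 0) = pvKey := by
    funext arg; rfl
  rw [hkey, PySem.List.sorted_eq_foldl_insertBy]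
  have := foldl_main validator [] [] (by simp) (by simp)
  simp only [List.nil_append] at this
  rw [this]
  rfl
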